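-- pv_equiv track=rewrite | github.com/Arnav12saxena/ai-search-algorithms | algorithms/Iterative_Deepening_DFS.py | iterative_deepening_dfs
-- ===== SOURCE A (Python) =====
-- maze = [
--     [0, 1, 0, 0, 0],
--     [0, 1, 0, 1, 0],
--     [0, 0, 0, 1, 0],
--     [1, 1, 0, 1, 0],
--     [0, 0, 0, 0, 0]
-- ]
--
-- def is_valid(row, col):
--     """Check if the position is within bounds and is an open path (0)."""
--     return 0 <= row < len(maze) and 0 <= col < len(maze[0]) and maze[row][col] == 0
--
-- def depth_limited_search(current, goal, depth, visited, path):
--     """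
--     Perform depth-limited search for a given depth limit.
--
--     Args:
--         - current: tuple (row, col) of current position
--         - goal: tuple (row, col) of goal position
--         - depth: current remaining depth limit
--         - visited: set of visited positions to avoid cycles
--         - path: list to build the path
--
--     Returns:
--         - list of positions if path found, else None
--     """
--     row, col = current
--     path.append(current)
--
--     if current == goal:
--         return path[:]  # Return a copy of the path
--
--     if depth <= 0:
--         path.pop()
--         return None
--
--     visited.add(current)
--
--     directions = [(-1, 0), (1, 0), (0, -1), (0, 1)]  # Up, down, left, right
--     for dr, dc in directions:
--         nr, nc = row + dr, col + dc
--         if is_valid(nr, nc) and (nr, nc) not in visited: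
--             result = depth_limited_search((nr, nc), goal, depth - 1, visited, path)
--             if result:
--                 return result
--
--     path.pop()
--     visited.remove(current)  # Backtrack
--     return None
--
-- def iterative_deepening_dfs(start, goal, max_depth):
--     """
--     Perform Iterative Deepening Depth-First Search to find a path from start to goal.
--
--     Args:
--         - start: tuple (row, col) of start position
--         - goal: tuple (row, col) of goal position
--         - max_depth: maximum depth to explore
--
--     Returns:
--         - list of positions representing the path if found, else None
--     """
--     for depth in range(max_depth + 1):
--         visited = set()
--         path = []
--         result = depth_limited_search(start, goal, depth, visited, path)
--         if result:
--             return result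
--     return None
-- ===== SOURCE B (Python) =====
-- maze = [
--     [0, 1, 0, 0, 0],
--     [0, 1, 0, 1, 0],
--     [0, 0, 0, 1, 0],
--     [1, 1, 0, 1, 0],
--     [0, 0, 0, 0, 0]
-- ]
--
-- def iterative_deepening_dfs(start, goal, max_depth):
--     """Iterative-deepening DFS, re-implemented with an explicit stack instead of
--     recursion, plus the standard IDDFS early exit: if a depth-limited pass ends
--     without ever hitting the depth cutoff, deeper passes cannot find anything new,
--     so return None immediately."""
--     rows, cols = len(maze), len(maze[0])
--     directions = [(-1, 0), (1, 0), (0, -1), (0, 1)]  # Up, down, left, right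
--     for depth in range(max_depth + 1):
--         path = [start]
--         if start == goal:
--             return path[:]
--         if depth > 0:
--             visited = {start}
--             stack = [(start, depth, 0)]   # (position, remaining depth, next direction index)
--             cutoff = False
--             while stack:
--                 (r, c), rem, i = stack[-1]
--                 if i == 4:
--                     # all directions tried: backtrack
--                     stack.pop()
--                     path.pop()
--                     visited.discard((r, c))
--                     continue
--                 stack[-1] = ((r, c), rem, i + 1)
--                 dr, dc = directions[i]
--                 nr, nc = r + dr, c + dc
--                 if 0 <= nr < rows and 0 <= nc < cols and maze[nr][nc] == 0 and (nr, nc) not in visited: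
--                     path.append((nr, nc))
--                     if (nr, nc) == goal:
--                         return path[:]
--                     if rem - 1 <= 0:
--                         path.pop()
--                         cutoff = True
--                     else:
--                         visited.add((nr, nc))
--                         stack.append(((nr, nc), rem - 1, 0))
--             if not cutoff:
--                 return None
--     return None
-- ===== Notes on version B (the rewrite author's own statement) =====
-- stated objective: faster
-- what changed: Replaced the recursive depth-limited search by an explicit stack machine (frames hold position, remaining depth and next-direction index, with shared path/visited updated on push/backtrack) and added the standard IDDFS early exit: a deepening pass that never hit the depth cutoff proves deeper passes are identical, so B returns None immediately instead of iterating all remaining depths.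
import Mathlib
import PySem

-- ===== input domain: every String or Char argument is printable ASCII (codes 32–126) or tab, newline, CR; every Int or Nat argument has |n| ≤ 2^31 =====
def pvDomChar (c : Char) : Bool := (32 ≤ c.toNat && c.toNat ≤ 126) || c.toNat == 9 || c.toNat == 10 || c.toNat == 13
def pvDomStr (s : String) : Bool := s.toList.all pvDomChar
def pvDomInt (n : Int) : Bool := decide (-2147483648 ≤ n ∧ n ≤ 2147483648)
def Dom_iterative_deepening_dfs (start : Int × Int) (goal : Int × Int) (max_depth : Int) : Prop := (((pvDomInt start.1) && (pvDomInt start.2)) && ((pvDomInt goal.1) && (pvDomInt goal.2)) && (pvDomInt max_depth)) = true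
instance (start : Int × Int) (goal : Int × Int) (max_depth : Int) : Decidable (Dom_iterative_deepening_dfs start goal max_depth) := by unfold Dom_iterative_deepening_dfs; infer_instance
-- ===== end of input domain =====

-- B replaces A's recursive depth-limited search by an explicit stack machine and adds the
-- standard IDDFS early exit (stop when a pass never hits the depth cutoff), which makes B
-- much faster for large max_depth when the goal is unreachable; return values are identical.


-- ===== PORT A =====

def pymaze : List (List Int) :=
  [[0, 1, 0, 0, 0],
   [0, 1, 0, 1, 0],
   [0, 0, 0, 1, 0],
   [1, 1, 0, 1, 0],
   [0, 0, 0, 0, 0]]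

def pvDirections : List (Int × Int) := [(-1, 0), (1, 0), (0, -1), (0, 1)]

def is_valid (row col : Int) : Bool :=
  decide (0 ≤ row ∧ row < (pymaze.length : Int)) &&
  decide (0 ≤ col ∧ col < ((PySem.List.pyGetD pymaze 0 []).length : Int)) &&
  (PySem.List.pyGetD (PySem.List.pyGetD pymaze row []) col 1 == 0)

-- the `for dr, dc in directions` loop of depth_limited_search; `recf` is the recursive call
-- (depth_limited_search at the next depth), passed in so that the recursion is structural on fuel
def dlsLoop
    (recf : (Int × Int) → PySem.Set (Int × Int) → List (Int × Int) →
      Option (List (Int × Int)) × PySem.Set (Int × Int) × List (Int × Int))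
    (current : Int × Int) :
    List (Int × Int) → PySem.Set (Int × Int) → List (Int × Int) →
      Option (List (Int × Int)) × PySem.Set (Int × Int) × List (Int × Int)
  | [], visited, path => (none, (PySem.Set.remove? visited current).getD visited, path.dropLast)
  | (dr, dc) :: rest, visited, path =>
    let nr := current.1 + dr
    let nc := current.2 + dc
    if is_valid nr nc && !(PySem.Set.contains visited (nr, nc)) then
      match recf (nr, nc) visited path with
      | (some result, v, p) =>
        if result.isEmpty then dlsLoop recf current rest v p else (some result, v, p)
      | (none, v, p) => dlsLoop recf current rest v p
    else dlsLoop recf current rest visited path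

-- depth_limited_search; Python's recursion descends on `depth`, totalized with fuel > depth.toNat
-- (then the fuel-0 branch is unreachable: depth decreases by 1 per level and is checked against 0)
def dls : Nat → (Int × Int) → (Int × Int) → Int → PySem.Set (Int × Int) → List (Int × Int) →
    Option (List (Int × Int)) × PySem.Set (Int × Int) × List (Int × Int)
  | 0, _, _, _, visited, path => (none, visited, path)
  | fuel + 1, current, goal, depth, visited, path =>
    let path := path ++ [current]
    if current == goal then (some path, visited, path)
    else if depth ≤ 0 then (none, visited, path.dropLast)
    else dlsLoop (fun pos v p => dls fuel pos goal (depth - 1) v p) current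
      pvDirections (PySem.Set.add visited current) path

def iddfsGo (start goal : Int × Int) : List Int → Option (List (Int × Int))
  | [] => none
  | d :: ds =>
    match dls (d.toNat + 1) start goal d PySem.Set.empty [] with
    | (some result, _, _) => if result.isEmpty then iddfsGo start goal ds else some result
    | (none, _, _) => iddfsGo start goal ds

def iterative_deepening_dfs (start : Int × Int) (goal : Int × Int) (max_depth : Int) :
    Option (List (Int × Int)) :=
  iddfsGo start goal (PySem.List.pyRange 0 (max_depth + 1) 1)

-- ===== PORT B =====

-- potential of a stack frame / stack: a strict upper bound on the number of remaining
-- iterations of the while loop, used as fuel to totalize it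
def pvW : Nat → Nat
  | 0 => 1
  | r + 1 => 5 + 4 * pvW r

def pvFramePot (f : (Int × Int) × Int × Nat) : Nat :=
  (4 - f.2.2) * (1 + pvW ((f.2.1 - 1).toNat)) + 1

def pvStackPot (stack : List ((Int × Int) × Int × Nat)) : Nat :=
  (stack.map pvFramePot).sum

-- the `while stack:` loop, one step per iteration; fuel > pvStackPot stack never runs out
-- (the potential strictly decreases at every iteration), so the fuel-0 branch is unreachable
def loopB : Nat → (Int × Int) → List ((Int × Int) × Int × Nat) →
    PySem.Set (Int × Int) → List (Int × Int) → Bool → Option (List (Int × Int)) × Bool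
  | 0, _, _, _, _, cutoff => (none, cutoff)
  | fuel + 1, goal, stack, visited, path, cutoff =>
    match stack with
    | [] => (none, cutoff)
    | ((r, c), rem, i) :: rest =>
      if i == 4 then
        loopB fuel goal rest (PySem.Set.discard visited (r, c)) path.dropLast cutoff
      else
        match pvDirections[i]? with
        | none => (none, cutoff)   -- unreachable: i stays in 0..4
        | some (dr, dc) =>
          let nr := r + dr
          let nc := c + dc
          if (decide (0 ≤ nr ∧ nr < (pymaze.length : Int)) &&
              decide (0 ≤ nc ∧ nc < ((PySem.List.pyGetD pymaze 0 []).length : Int)) &&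
              (PySem.List.pyGetD (PySem.List.pyGetD pymaze nr []) nc 1 == 0)) &&
             !(PySem.Set.contains visited (nr, nc)) then
            let path' := path ++ [(nr, nc)]
            if (nr, nc) == goal then (some path', cutoff)
            else if rem - 1 ≤ 0 then
              loopB fuel goal (((r, c), rem, i + 1) :: rest) visited path'.dropLast true
            else
              loopB fuel goal (((nr, nc), rem - 1, 0) :: ((r, c), rem, i + 1) :: rest)
                (PySem.Set.add visited (nr, nc)) path' cutoff
          else
            loopB fuel goal (((r, c), rem, i + 1) :: rest) visited path cutoff

def iddfsAltGo (start goal : Int × Int) : List Int → Option (List (Int × Int))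
  | [] => none
  | d :: ds =>
    let path : List (Int × Int) := [start]
    if start == goal then some path
    else if 0 < d then
      match loopB (pvStackPot [(start, d, 0)] + 1) goal [(start, d, 0)]
          (PySem.Set.ofList [start]) path false with
      | (some result, _) => some result
      | (none, cutoff) => if cutoff then iddfsAltGo start goal ds else none
    else iddfsAltGo start goal ds

def iterative_deepening_dfs_alt (start : Int × Int) (goal : Int × Int) (max_depth : Int) :
    Option (List (Int × Int)) :=
  iddfsAltGo start goal (PySem.List.pyRange 0 (max_depth + 1) 1)

-- ===== PRECONDITION & SPEC =====
def Spec_iterative_deepening_dfs (start : Int × Int) (goal : Int × Int) (max_depth : Int) (out : Option (List (Int × Int))) : Prop := out = iterative_deepening_dfs_alt start goal max_depth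
instance (start : Int × Int) (goal : Int × Int) (max_depth : Int) (out : Option (List (Int × Int))) : Decidable (Spec_iterative_deepening_dfs start goal max_depth out) := by unfold Spec_iterative_deepening_dfs; infer_instance

-- ===== CLAIM (what is proved, stated in full; the proofs are below) =====
def Claim_equal_iterative_deepening_dfs : Prop := ∀ (start : Int × Int) (goal : Int × Int) (max_depth : Int), Dom_iterative_deepening_dfs start goal max_depth → Spec_iterative_deepening_dfs start goal max_depth (iterative_deepening_dfs start goal max_depth)

-- ===== LEMMAS AND PROOFS =====

-- Proof-only instrumented copy of A's depth-limited search: the extra Bool records whether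
-- the search ever hit the depth cutoff at a non-goal node (= B's `cutoff` flag).
def dlsLoopC
    (recf : (Int × Int) → PySem.Set (Int × Int) → List (Int × Int) →
      Option (List (Int × Int)) × PySem.Set (Int × Int) × List (Int × Int) × Bool)
    (current : Int × Int) :
    List (Int × Int) → PySem.Set (Int × Int) → List (Int × Int) →
      Option (List (Int × Int)) × PySem.Set (Int × Int) × List (Int × Int) × Bool
  | [], visited, path => (none, (PySem.Set.remove? visited current).getD visited, path.dropLast, false)
  | (dr, dc) :: rest, visited, path =>
    let nr := current.1 + dr
    let nc := current.2 + dc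
    if is_valid nr nc && !(PySem.Set.contains visited (nr, nc)) then
      match recf (nr, nc) visited path with
      | (some result, v, p, cf) =>
        if result.isEmpty then
          let r' := dlsLoopC recf current rest v p
          (r'.1, r'.2.1, r'.2.2.1, cf || r'.2.2.2)
        else (some result, v, p, cf)
      | (none, v, p, cf) =>
        let r' := dlsLoopC recf current rest v p
        (r'.1, r'.2.1, r'.2.2.1, cf || r'.2.2.2)
    else dlsLoopC recf current rest visited path

def dlsC : Nat → (Int × Int) → (Int × Int) → Int → PySem.Set (Int × Int) → List (Int × Int) →
    Option (List (Int × Int)) × PySem.Set (Int × Int) × List (Int × Int) × Bool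
  | 0, _, _, _, visited, path => (none, visited, path, false)
  | fuel + 1, current, goal, depth, visited, path =>
    let path := path ++ [current]
    if current == goal then (some path, visited, path, false)
    else if depth ≤ 0 then (none, visited, path.dropLast, true)
    else dlsLoopC (fun pos v p => dlsC fuel pos goal (depth - 1) v p) current
      pvDirections (PySem.Set.add visited current) path

def dlsCfull (current goal : Int × Int) (depth : Int) (visited : PySem.Set (Int × Int))
    (path : List (Int × Int)) :
    Option (List (Int × Int)) × PySem.Set (Int × Int) × List (Int × Int) × Bool :=
  dlsC (depth.toNat + 1) current goal depth visited path

-- what the machine computes, frame by frame, expressed through the instrumented search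
def mspec (g : Int × Int) : List ((Int × Int) × Int × Nat) →
    PySem.Set (Int × Int) → List (Int × Int) → Bool → Option (List (Int × Int)) × Bool
  | [], _, _, cf => (none, cf)
  | (cur, dd, i) :: rest, v, p, cf =>
    match dlsLoopC (fun pos vv pp => dlsCfull pos g (dd - 1) vv pp) cur
        (pvDirections.drop i) v p with
    | (some r, _, _, c) => (some r, cf || c)
    | (none, v', p', c) => mspec g rest v' p' (cf || c)

theorem pv_remove_getD (s : PySem.Set (Int × Int)) (x : Int × Int) :
    (PySem.Set.remove? s x).getD s = PySem.Set.discard s x := by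
  by_cases h : x ∈ s
  · simp [PySem.Set.remove?, h]
  · simp [PySem.Set.remove?, h, PySem.Set.discard]
    exact (List.filter_eq_self.mpr (fun y hy => by
      simp only [Bool.not_eq_eq_eq_not, Bool.not_true, beq_eq_false_iff_ne, ne_eq]
      rintro rfl
      exact h hy)).symm

theorem pv_loopC_congr
    (recf recf' : (Int × Int) → PySem.Set (Int × Int) → List (Int × Int) →
      Option (List (Int × Int)) × PySem.Set (Int × Int) × List (Int × Int) × Bool)
    (h : ∀ pos v p, recf pos v p = recf' pos v p) (cur : Int × Int) :
    ∀ (dirs : List (Int × Int)) (v : PySem.Set (Int × Int)) (p : List (Int × Int)),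
      dlsLoopC recf cur dirs v p = dlsLoopC recf' cur dirs v p := by
  intro dirs
  induction dirs with
  | nil => intro v p; rfl
  | cons hd tl ih =>
    intro v p
    obtain ⟨dr, dc⟩ := hd
    rw [dlsLoopC, dlsLoopC]
    by_cases hv : (is_valid (cur.1 + dr) (cur.2 + dc) && !(PySem.Set.contains v (cur.1 + dr, cur.2 + dc))) = true
    · simp only [hv, if_true, h]
      rcases hX : recf' (cur.1 + dr, cur.2 + dc) v p with ⟨rr, v2, p2, cf⟩
      cases rr with
      | some result =>
        by_cases he : result.isEmpty
        · simp only [he, if_true, ih]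
        · simp only [he, Bool.false_eq_true, if_false]
      | none => simp only [ih]
    · simp only [hv, Bool.false_eq_true, if_false, ih]

theorem pv_dlsC_fuel : ∀ (f1 : Nat), ∀ (f2 : Nat) (cur g : Int × Int) (d : Int)
    (v : PySem.Set (Int × Int)) (p : List (Int × Int)),
    d.toNat < f1 → d.toNat < f2 → dlsC f1 cur g d v p = dlsC f2 cur g d v p := by
  intro f1
  induction f1 with
  | zero => intro f2 cur g d v p h1; omega
  | succ f1 ih =>
    intro f2 cur g d v p h1 h2
    match f2, h2 with
    | f2 + 1, h2 =>
      rw [dlsC, dlsC]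
      by_cases hg : (cur == g) = true
      · simp only [hg, if_true]
      · by_cases hd0 : d ≤ 0
        · simp only [hg, Bool.false_eq_true, if_false, hd0, if_true]
        · simp only [hg, Bool.false_eq_true, if_false, hd0]
          exact pv_loopC_congr _ _
            (fun pos v p => ih f2 pos g (d - 1) v p (by omega) (by omega)) cur _ _ _

theorem pv_loop_erase
    (recfA : (Int × Int) → PySem.Set (Int × Int) → List (Int × Int) →
      Option (List (Int × Int)) × PySem.Set (Int × Int) × List (Int × Int))
    (recfC : (Int × Int) → PySem.Set (Int × Int) → List (Int × Int) →
      Option (List (Int × Int)) × PySem.Set (Int × Int) × List (Int × Int) × Bool)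
    (h : ∀ pos v p, recfA pos v p =
      ((recfC pos v p).1, (recfC pos v p).2.1, (recfC pos v p).2.2.1)) (cur : Int × Int) :
    ∀ (dirs : List (Int × Int)) (v : PySem.Set (Int × Int)) (p : List (Int × Int)),
      dlsLoop recfA cur dirs v p =
        ((dlsLoopC recfC cur dirs v p).1, (dlsLoopC recfC cur dirs v p).2.1,
          (dlsLoopC recfC cur dirs v p).2.2.1) := by
  intro dirs
  induction dirs with
  | nil => intro v p; rfl
  | cons hd tl ih =>
    intro v p
    obtain ⟨dr, dc⟩ := hd
    rw [dlsLoop, dlsLoopC]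
    by_cases hv : (is_valid (cur.1 + dr) (cur.2 + dc) && !(PySem.Set.contains v (cur.1 + dr, cur.2 + dc))) = true
    · simp only [hv, if_true, h]
      rcases hX : recfC (cur.1 + dr, cur.2 + dc) v p with ⟨rr, v2, p2, cf⟩
      cases rr with
      | some result =>
        by_cases he : result.isEmpty
        · simp only [he, if_true, ih]
        · simp only [he, Bool.false_eq_true, if_false]
      | none => simp only [ih]
    · simp only [hv, Bool.false_eq_true, if_false, ih]

theorem pv_erase : ∀ (fuel : Nat) (cur g : Int × Int) (d : Int)
    (v : PySem.Set (Int × Int)) (p : List (Int × Int)),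
    dls fuel cur g d v p =
      ((dlsC fuel cur g d v p).1, (dlsC fuel cur g d v p).2.1, (dlsC fuel cur g d v p).2.2.1) := by
  intro fuel
  induction fuel with
  | zero => intro cur g d v p; rfl
  | succ fuel ih =>
    intro cur g d v p
    rw [dls, dlsC]
    by_cases hg : (cur == g) = true
    · simp only [hg, if_true]
    · by_cases hd0 : d ≤ 0
      · simp only [hg, Bool.false_eq_true, if_false, hd0, if_true]
      · simp only [hg, Bool.false_eq_true, if_false, hd0]
        exact pv_loop_erase _ _ (fun pos v p => ih pos g (d - 1) v p) cur _ _ _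

theorem pv_loop_nonempty
    (recf : (Int × Int) → PySem.Set (Int × Int) → List (Int × Int) →
      Option (List (Int × Int)) × PySem.Set (Int × Int) × List (Int × Int) × Bool)
    (h : ∀ pos v p r, (recf pos v p).1 = some r → r ≠ []) (cur : Int × Int) :
    ∀ (dirs : List (Int × Int)) (v : PySem.Set (Int × Int)) (p : List (Int × Int))
      (r : List (Int × Int)), (dlsLoopC recf cur dirs v p).1 = some r → r ≠ [] := by
  intro dirs
  induction dirs with
  | nil => intro v p r hr; simp [dlsLoopC] at hr
  | cons hd tl ih =>
    intro v p r hr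
    obtain ⟨dr, dc⟩ := hd
    rw [dlsLoopC] at hr
    by_cases hv : (is_valid (cur.1 + dr) (cur.2 + dc) && !(PySem.Set.contains v (cur.1 + dr, cur.2 + dc))) = true
    · simp only [hv, if_true] at hr
      rcases hX : recf (cur.1 + dr, cur.2 + dc) v p with ⟨rr, v2, p2, cf⟩
      rw [hX] at hr
      cases rr with
      | some result =>
        simp only at hr
        by_cases he : result.isEmpty
        · simp only [he, if_true] at hr
          exact ih v2 p2 r hr
        · simp only [he, Bool.false_eq_true, if_false] at hr
          obtain rfl : result = r := by simpa using hr
          exact h _ v p result (by rw [hX])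
      | none => exact ih v2 p2 r (by simpa using hr)
    · simp only [hv, Bool.false_eq_true, if_false] at hr
      exact ih v p r hr

theorem pv_nonempty : ∀ (fuel : Nat) (cur g : Int × Int) (d : Int)
    (v : PySem.Set (Int × Int)) (p : List (Int × Int)) (r : List (Int × Int)),
    (dlsC fuel cur g d v p).1 = some r → r ≠ [] := by
  intro fuel
  induction fuel with
  | zero => intro cur g d v p r hr; simp [dlsC] at hr
  | succ fuel ih =>
    intro cur g d v p r hr
    rw [dlsC] at hr
    by_cases hg : (cur == g) = true
    · simp only [hg, if_true] at hr
      obtain rfl : p ++ [cur] = r := by simpa using hr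
      simp
    · by_cases hd0 : d ≤ 0
      · simp [hg, hd0] at hr
      · simp only [hg, Bool.false_eq_true, if_false, hd0, if_false] at hr
        exact pv_loop_nonempty _ (fun pos v p r => ih pos g (d - 1) v p r) cur _ _ _ r hr

theorem pv_loopC_stable
    (recfd recfe : (Int × Int) → PySem.Set (Int × Int) → List (Int × Int) →
      Option (List (Int × Int)) × PySem.Set (Int × Int) × List (Int × Int) × Bool)
    (h : ∀ pos v p, (recfd pos v p).2.2.2 = false → recfe pos v p = recfd pos v p)
    (cur : Int × Int) :
    ∀ (dirs : List (Int × Int)) (v : PySem.Set (Int × Int)) (p : List (Int × Int)),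
      (dlsLoopC recfd cur dirs v p).2.2.2 = false →
      dlsLoopC recfe cur dirs v p = dlsLoopC recfd cur dirs v p := by
  intro dirs
  induction dirs with
  | nil => intro v p _; rfl
  | cons hd tl ih =>
    intro v p hcf
    obtain ⟨dr, dc⟩ := hd
    rw [dlsLoopC] at hcf
    rw [dlsLoopC, dlsLoopC]
    by_cases hv : (is_valid (cur.1 + dr) (cur.2 + dc) && !(PySem.Set.contains v (cur.1 + dr, cur.2 + dc))) = true
    · simp only [hv, if_true] at hcf ⊢
      rcases hX : recfd (cur.1 + dr, cur.2 + dc) v p with ⟨rr, v2, p2, cfc⟩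
      rw [hX] at hcf
      cases rr with
      | some result =>
        simp only at hcf
        by_cases he : result.isEmpty
        · simp only [he, if_true] at hcf
          rcases Bool.or_eq_false_iff.mp hcf with ⟨hcfc, hrest⟩
          rw [h _ v p (by rw [hX]; exact hcfc), hX]
          simp only [he, if_true, ih v2 p2 hrest]
        · simp only [he, Bool.false_eq_true, if_false] at hcf
          rw [h _ v p (by rw [hX]; exact hcf), hX]
          simp only [he, Bool.false_eq_true, if_false]
      | none =>
        simp only at hcf
        rcases Bool.or_eq_false_iff.mp hcf with ⟨hcfc, hrest⟩
        rw [h _ v p (by rw [hX]; exact hcfc), hX]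
        simp only [ih v2 p2 hrest]
    · simp only [hv, Bool.false_eq_true, if_false] at hcf ⊢
      exact ih v p hcf

-- stability: a pass that never hit the depth cutoff gives the same result at any larger depth
theorem pv_stable : ∀ (n : Nat) (d e : Int) (c g : Int × Int)
    (v : PySem.Set (Int × Int)) (p : List (Int × Int)),
    d.toNat ≤ n → (dlsCfull c g d v p).2.2.2 = false → d ≤ e →
    dlsCfull c g e v p = dlsCfull c g d v p := by
  intro n
  induction n with
  | zero =>
    intro d e c g v p hd hcf hde
    unfold dlsCfull at hcf ⊢
    rw [dlsC] at hcf
    rw [dlsC, dlsC]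
    by_cases hg : (c == g) = true
    · simp [hg]
    · have hd0 : d ≤ 0 := by omega
      simp [hg, hd0] at hcf
  | succ n ih =>
    intro d e c g v p hd hcf hde
    unfold dlsCfull at hcf ⊢
    rw [dlsC] at hcf
    rw [dlsC, dlsC]
    by_cases hg : (c == g) = true
    · simp [hg]
    · by_cases hd0 : d ≤ 0
      · simp [hg, hd0] at hcf
      · have he0 : ¬ e ≤ 0 := by omega
        simp only [hg, Bool.false_eq_true, if_false, hd0, he0] at hcf ⊢
        have hdt : d.toNat = (d - 1).toNat + 1 := by omega
        have het : e.toNat = (e - 1).toNat + 1 := by omega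
        rw [hdt] at hcf ⊢
        rw [het]
        exact pv_loopC_stable _ _
          (fun pos vv pp hflag => ih (d - 1) (e - 1) pos g vv pp (by omega) hflag (by omega))
          c _ _ _ hcf

theorem pv_pot_pos (f : (Int × Int) × Int × Nat) : 1 ≤ pvFramePot f := by
  unfold pvFramePot; omega

theorem pv_pot_pop (x : (Int × Int) × Int × Nat) (rest : List ((Int × Int) × Int × Nat)) :
    pvStackPot rest < pvStackPot (x :: rest) := by
  have := pv_pot_pos x
  simp only [pvStackPot, List.map_cons, List.sum_cons]
  omega

theorem pv_pot_step (x : Int × Int) (rem : Int) (i : Nat) (rest : List ((Int × Int) × Int × Nat))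
    (hi : i < 4) : pvStackPot ((x, rem, i + 1) :: rest) < pvStackPot ((x, rem, i) :: rest) := by
  simp only [pvStackPot, pvFramePot, List.map_cons, List.sum_cons]
  have h4 : 4 - i = (4 - (i + 1)) + 1 := by omega
  rw [h4, add_mul, one_mul]; omega

theorem pv_pot_push (x y : Int × Int) (rem : Int) (i : Nat) (rest : List ((Int × Int) × Int × Nat))
    (hrem : ¬ rem - 1 ≤ 0) (hi : i < 4) :
    pvStackPot ((y, rem - 1, 0) :: (x, rem, i + 1) :: rest) < pvStackPot ((x, rem, i) :: rest) := by
  simp only [pvStackPot, pvFramePot, List.map_cons, List.sum_cons]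
  have hr : (rem - 1).toNat = (rem - 1 - 1).toNat + 1 := by omega
  have h4 : 4 - i = (4 - (i + 1)) + 1 := by omega
  rw [hr, h4, add_mul, one_mul]
  simp only [pvW]
  omega

-- simulation: with enough fuel, B's stack machine computes mspec
theorem pv_sim : ∀ (fuel : Nat) (g : Int × Int) (stack : List ((Int × Int) × Int × Nat))
    (v : PySem.Set (Int × Int)) (p : List (Int × Int)) (cf : Bool),
    pvStackPot stack < fuel → (∀ f ∈ stack, f.2.2 ≤ 4) →
    loopB fuel g stack v p cf = mspec g stack v p cf := by
  intro fuel
  induction fuel with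
  | zero => intro g stack v p cf hpot hwf; omega
  | succ fuel ih =>
    intro g stack v p cf hpot hwf
    match stack with
    | [] => rfl
    | ((r, c), rem, i) :: rest =>
      have hi : i ≤ 4 := hwf ((r, c), rem, i) (by simp)
      have hwfr : ∀ f ∈ rest, f.2.2 ≤ 4 := fun f hf => hwf f (by simp [hf])
      rw [loopB, mspec]
      by_cases h4 : i = 4
      · subst h4
        simp only [beq_self_eq_true, if_true]
        rw [show pvDirections.drop 4 = ([] : List (Int × Int)) from rfl, dlsLoopC]
        simp only [pv_remove_getD, Bool.or_false]
        exact ih g rest _ _ cf (by have := pv_pot_pop ((r, c), rem, 4) rest; omega) hwfr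
      · have hi3 : i < 4 := by omega
        have hne : (i == 4) = false := by simp [h4]
        have hget : pvDirections[i]? = some pvDirections[i] :=
          List.getElem?_eq_getElem (by simpa [pvDirections] using hi3)
        simp only [hne, Bool.false_eq_true, if_false]
        split
        · next heq => rw [heq] at hget; cases hget
        · next dr dc heq =>
          obtain ⟨hlt, hgi⟩ := List.getElem?_eq_some_iff.mp heq
          have hdrop : pvDirections.drop i = (dr, dc) :: pvDirections.drop (i + 1) := by
            rw [← List.getElem_cons_drop hlt, hgi]
          have hpots : pvStackPot (((r, c), rem, i + 1) :: rest) < fuel := by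
            have := pv_pot_step (r, c) rem i rest hi3; omega
          have hwfs : ∀ f ∈ (((r, c), rem, i + 1) :: rest), f.2.2 ≤ 4 := by
            intro f hf
            rcases List.mem_cons.mp hf with rfl | hf
            · show i + 1 ≤ 4; omega
            · exact hwfr f hf
          rw [hdrop, dlsLoopC]
          simp only [is_valid]
          by_cases hv : ((decide (0 ≤ r + dr ∧ r + dr < (pymaze.length : Int)) &&
                  decide (0 ≤ c + dc ∧ c + dc < ((PySem.List.pyGetD pymaze 0 []).length : Int)) &&
                PySem.List.pyGetD (PySem.List.pyGetD pymaze (r + dr) []) (c + dc) 1 == 0) &&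
              !(PySem.Set.contains v (r + dr, c + dc))) = true
          · simp only [hv, if_true]
            rw [show dlsCfull (r + dr, c + dc) g (rem - 1) v p =
                dlsC ((rem - 1).toNat + 1) (r + dr, c + dc) g (rem - 1) v p from rfl, dlsC]
            by_cases hg : ((r + dr, c + dc) == g) = true
            · simp only [hg, if_true]
              have hemp : (p ++ [(r + dr, c + dc)]).isEmpty = false := by simp
              simp only [hemp, Bool.false_eq_true, if_false, Bool.or_false]
            · by_cases hd0 : rem - 1 ≤ 0
              · simp only [hg, Bool.false_eq_true, if_false, hd0, if_true, List.dropLast_concat]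
                rw [ih g (((r, c), rem, i + 1) :: rest) v p true hpots hwfs, mspec]
                rcases hr' : dlsLoopC (fun pos vv pp => dlsCfull pos g (rem - 1) vv pp) (r, c)
                    (pvDirections.drop (i + 1)) v p with ⟨rr, v2, p2, cc⟩
                cases rr with
                | some rr' =>
                  simp only
                  have hor : (cf || (true || cc)) = (true || cc) := by cases cf <;> simp
                  rw [hor]
                | none =>
                  simp only
                  have hor : (cf || (true || cc)) = (true || cc) := by cases cf <;> simp
                  rw [hor]
              · simp only [hg, Bool.false_eq_true, if_false, hd0]
                have hpotp : pvStackPot (((r + dr, c + dc), rem - 1, 0) ::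
                    ((r, c), rem, i + 1) :: rest) < fuel := by
                  have := pv_pot_push (r, c) (r + dr, c + dc) rem i rest hd0 hi3; omega
                have hwfp : ∀ f ∈ (((r + dr, c + dc), rem - 1, 0) ::
                    ((r, c), rem, i + 1) :: rest), f.2.2 ≤ 4 := by
                  intro f hf
                  rcases List.mem_cons.mp hf with rfl | hf
                  · show (0 : Nat) ≤ 4; omega
                  · exact hwfs f hf
                rw [ih g _ _ _ cf hpotp hwfp, mspec]
                have hfuelc : ∀ (pos : Int × Int) (vv : PySem.Set (Int × Int)) (pp : List (Int × Int)),
                    dlsC ((rem - 1).toNat) pos g (rem - 1 - 1) vv pp =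
                    dlsCfull pos g (rem - 1 - 1) vv pp := by
                  intro pos vv pp
                  unfold dlsCfull
                  exact pv_dlsC_fuel _ _ pos g _ vv pp (by omega) (by omega)
                rw [pv_loopC_congr _ _ hfuelc (r + dr, c + dc) pvDirections
                  (PySem.Set.add v (r + dr, c + dc)) (p ++ [(r + dr, c + dc)])]
                rw [show pvDirections.drop 0 = pvDirections from rfl]
                rcases hX1 : dlsLoopC (fun pos vv pp => dlsCfull pos g (rem - 1 - 1) vv pp)
                    (r + dr, c + dc) pvDirections (PySem.Set.add v (r + dr, c + dc))
                    (p ++ [(r + dr, c + dc)]) with ⟨rr1, v2, p2, cc⟩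
                cases rr1 with
                | some result =>
                  have hres : result ≠ [] :=
                    pv_loop_nonempty (fun pos vv pp => dlsCfull pos g (rem - 1 - 1) vv pp)
                      (fun pos vv pp rr hrr =>
                        pv_nonempty ((rem - 1 - 1).toNat + 1) pos g (rem - 1 - 1) vv pp rr hrr)
                      (r + dr, c + dc) pvDirections _ _ result (by rw [hX1])
                  have hemp : result.isEmpty = false := by
                    cases result with
                    | nil => exact absurd rfl hres
                    | cons a as => rfl
                  simp only [hemp, Bool.false_eq_true, if_false]
                | none =>
                  simp only
                  rw [mspec]
                  rcases hr2 : dlsLoopC (fun pos vv pp => dlsCfull pos g (rem - 1) vv pp) (r, c)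
                      (pvDirections.drop (i + 1)) v2 p2 with ⟨rr2, v3, p3, cc2⟩
                  cases rr2 with
                  | some rr2' => simp only [Bool.or_assoc]
                  | none => simp only [Bool.or_assoc]
          · simp only [hv, Bool.false_eq_true, if_false]
            rw [ih g (((r, c), rem, i + 1) :: rest) v p cf hpots hwfs, mspec]

theorem pv_go_none (s g : Int × Int) : ∀ (ds : List Int),
    (∀ e ∈ ds, (dls (e.toNat + 1) s g e PySem.Set.empty []).1 = none) →
    iddfsGo s g ds = none := by
  intro ds
  induction ds with
  | nil => intro _; rfl
  | cons e ds ih =>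
    intro h
    rw [iddfsGo]
    rcases hX : dls (e.toNat + 1) s g e PySem.Set.empty [] with ⟨rr, v1, p1⟩
    have he := h e (by simp)
    rw [hX] at he
    simp only at he
    subst he
    exact ih (fun e' he' => h e' (by simp [he']))

theorem pv_go_eq (s g : Int × Int) : ∀ (ds : List Int), ds.Pairwise (· ≤ ·) →
    iddfsGo s g ds = iddfsAltGo s g ds := by
  intro ds hp
  induction ds with
  | nil => rfl
  | cons d ds ih =>
    rw [List.pairwise_cons] at hp
    obtain ⟨hle, hp'⟩ := hp
    rw [iddfsGo, iddfsAltGo]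
    by_cases hg : (s == g) = true
    · rw [dls]
      simp only [hg, if_true, List.nil_append]
      have hemp : ([s] : List (Int × Int)).isEmpty = false := rfl
      simp only [hemp, Bool.false_eq_true, if_false]
    · by_cases hd0 : 0 < d
      · have hd0' : ¬ d ≤ 0 := by omega
        rw [dls]
        simp only [hg, Bool.false_eq_true, if_false, hd0, if_true, hd0', List.nil_append]
        have hset : PySem.Set.ofList [s] = PySem.Set.add PySem.Set.empty s := rfl
        rw [pv_sim (pvStackPot [(s, d, 0)] + 1) g [(s, d, 0)] (PySem.Set.ofList [s]) [s] false
          (by omega) (by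
            intro f hf
            rcases List.mem_cons.mp hf with rfl | hf
            · show (0 : Nat) ≤ 4; omega
            · simp at hf)]
        rw [mspec, hset]
        rw [show pvDirections.drop 0 = pvDirections from rfl]
        rw [pv_loop_erase (fun pos v p => dls d.toNat pos g (d - 1) v p)
          (fun pos v p => dlsC d.toNat pos g (d - 1) v p)
          (fun pos v p => pv_erase d.toNat pos g (d - 1) v p) s pvDirections
          (PySem.Set.add PySem.Set.empty s) [s]]
        have hfc : ∀ (pos : Int × Int) (vv : PySem.Set (Int × Int)) (pp : List (Int × Int)),
            dlsC d.toNat pos g (d - 1) vv pp = dlsCfull pos g (d - 1) vv pp := by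
          intro pos vv pp
          unfold dlsCfull
          exact pv_dlsC_fuel _ _ pos g _ vv pp (by omega) (by omega)
        rw [pv_loopC_congr _ _ hfc s pvDirections (PySem.Set.add PySem.Set.empty s) [s]]
        rcases hX : dlsLoopC (fun pos vv pp => dlsCfull pos g (d - 1) vv pp) s pvDirections
            (PySem.Set.add PySem.Set.empty s) [s] with ⟨rr, v2, p2, cc⟩
        cases rr with
        | some result =>
          have hres : result ≠ [] :=
            pv_loop_nonempty (fun pos vv pp => dlsCfull pos g (d - 1) vv pp)
              (fun pos vv pp rr hrr =>
                pv_nonempty ((d - 1).toNat + 1) pos g (d - 1) vv pp rr hrr)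
              s pvDirections _ _ result (by rw [hX])
          have hemp : result.isEmpty = false := by
            cases result with
            | nil => exact absurd rfl hres
            | cons a as => rfl
          simp only [hemp, Bool.false_eq_true, if_false]
        | none =>
          simp only
          rw [mspec]
          cases cc with
          | true =>
            simp only [Bool.false_or, if_true]
            exact ih hp'
          | false =>
            simp only [Bool.false_or, Bool.false_eq_true, if_false]
            have hC : dlsCfull s g d PySem.Set.empty [] = (none, v2, p2, false) := by
              unfold dlsCfull
              rw [dlsC]
              simp only [hg, Bool.false_eq_true, if_false, hd0', if_false, List.nil_append]
              rw [pv_loopC_congr _ _ hfc s pvDirections (PySem.Set.add PySem.Set.empty s) [s], hX]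
            apply pv_go_none
            intro e he
            have hstab := pv_stable d.toNat d e s g PySem.Set.empty [] (le_refl _)
              (by rw [hC]) (hle e he)
            rw [pv_erase (e.toNat + 1) s g e PySem.Set.empty []]
            rw [show dlsC (e.toNat + 1) s g e PySem.Set.empty [] =
              dlsCfull s g e PySem.Set.empty [] from rfl, hstab, hC]
      · have hd0' : d ≤ 0 := by omega
        rw [dls]
        simp only [hg, Bool.false_eq_true, if_false, hd0, hd0', if_true, List.nil_append]
        exact ih hp'

-- ===== VERDICT (by name: the statement is the Claim_ definition above) =====
theorem iterative_deepening_dfs_spec : Claim_equal_iterative_deepening_dfs := by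
  intro start goal max_depth _hdom
  unfold Spec_iterative_deepening_dfs iterative_deepening_dfs iterative_deepening_dfs_alt
  exact pv_go_eq start goal _ ((PySem.List.pairwise_lt_pyRange_one 0 (max_depth + 1)).imp le_of_lt)
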